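-- pv_equiv track=rewrite | github.com/VisionInternet/visionLiveSDK-Python | visionLiveSDK/apiClient.py | _sortedIgnoreCase
-- ===== SOURCE A (Python) =====
-- def _sortedIgnoreCase(keys):
--     # ignore case as server side is using C#, which is case insensitive
--     dictOfKeys = {}
--     for key in keys:
--         dictOfKeys[key.lower()] = key
--
--     result = []
--     for key in sorted(dictOfKeys.keys()):
--         result.append(dictOfKeys.get(key))
--
--     return result
-- ===== SOURCE B (Python) =====
-- def _sortedIgnoreCase(keys):
--     # sort-then-dedup: stable sort by lowercase, then one linear pass
--     # merging equal-lowercase runs, keeping the last occurrence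
--     result = []
--     for key in sorted(keys, key=lambda k: k.lower()):
--         if result and result[-1].lower() == key.lower():
--             result[-1] = key
--         else:
--             result.append(key)
--     return result
-- ===== Notes on version B (the rewrite author's own statement) =====
-- stated objective: alternative
-- what changed: Replaces A's dict-based dedup (lowercase-keyed dict built first, then its keys sorted and looked up) by a stable sort of the original keys on their lowercase form followed by a single linear pass that merges equal-lowercase runs, keeping the last occurrence; no dictionary is built.
import Mathlib
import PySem

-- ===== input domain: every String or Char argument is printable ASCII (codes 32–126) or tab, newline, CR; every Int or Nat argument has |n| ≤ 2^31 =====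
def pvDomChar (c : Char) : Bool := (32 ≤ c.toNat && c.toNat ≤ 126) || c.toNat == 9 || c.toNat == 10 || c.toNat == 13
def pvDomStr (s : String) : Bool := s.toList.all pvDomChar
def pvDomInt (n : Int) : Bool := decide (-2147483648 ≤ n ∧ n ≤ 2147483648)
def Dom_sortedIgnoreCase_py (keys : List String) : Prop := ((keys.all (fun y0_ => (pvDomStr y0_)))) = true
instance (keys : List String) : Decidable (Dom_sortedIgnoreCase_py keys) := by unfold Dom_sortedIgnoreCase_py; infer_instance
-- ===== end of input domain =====

-- B replaces A's dict-based dedup-then-sort by a stable sort on the lowercase key followed by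
-- one linear pass merging equal-lowercase runs (keeping the last occurrence): same values, different decomposition.


-- ===== PORT A =====
-- dictOfKeys.get(key) is queried only at keys of the dict, where it always returns its value;
-- the `.getD ""` default is therefore never used (exact).
def sortedIgnoreCase_py (keys : List String) : List String :=
  let dictOfKeys : PySem.Dict String String :=
    keys.foldl (fun d key => d.insert (PySem.Str.lower key) key) PySem.Dict.empty
  (PySem.List.sorted dictOfKeys.keys (fun k => k) false).foldl
    (fun result key => result ++ [(dictOfKeys.get? key).getD ""]) []

-- ===== PORT B =====
-- one step of Source B's dedup loop: merge into the last slot if the lowercase matches, else append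
def dedupStep (result : List String) (key : String) : List String :=
  match result.getLast? with
  | some last =>
      if PySem.Str.lower last = PySem.Str.lower key then result.dropLast ++ [key]
      else result ++ [key]
  | none => result ++ [key]

def sortedIgnoreCase_py_alt (keys : List String) : List String :=
  (PySem.List.sorted keys (fun k => PySem.Str.lower k) false).foldl dedupStep []

-- ===== PRECONDITION & SPEC =====
def Spec_sortedIgnoreCase_py (keys : List String) (out : List String) : Prop := out = sortedIgnoreCase_py_alt keys
instance (keys : List String) (out : List String) : Decidable (Spec_sortedIgnoreCase_py keys out) := by unfold Spec_sortedIgnoreCase_py; infer_instance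

-- ===== CLAIM (what is proved, stated in full; the proofs are below) =====
def Claim_equal_sortedIgnoreCase_py : Prop := ∀ (keys : List String), Dom_sortedIgnoreCase_py keys → Spec_sortedIgnoreCase_py keys (sortedIgnoreCase_py keys)

-- ===== LEMMAS AND PROOFS =====

-- the last key of `xs` whose lowercase form is `l` (the value A's dict stores at `l`)
def lastM (xs : List String) (l : String) : Option String :=
  (xs.filter (fun k => PySem.Str.lower k == l)).getLast?

-- A's dict, characterised: lookup at `l` is the last key whose lowercase is `l`
lemma get?_dictFold (keys : List String) (d : PySem.Dict String String) (l : String) :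
    (keys.foldl (fun d k => d.insert (PySem.Str.lower k) k) d).get? l
      = match lastM keys l with
        | some k => some k
        | none => d.get? l := by
  induction keys using List.reverseRecOn generalizing d with
  | nil => simp [lastM]
  | append_singleton ks k ih =>
      rw [List.foldl_append]
      simp only [List.foldl_cons, List.foldl_nil, PySem.Dict.get?_insert]
      by_cases h : l = PySem.Str.lower k
      · have hfil : lastM (ks ++ [k]) l = some k := by
          simp [lastM, List.filter_append, h]
        rw [if_pos h, hfil]
      · have hb : (PySem.Str.lower k == l) = false := by
          simp [Ne.symm h]
        have hfil : lastM (ks ++ [k]) l = lastM ks l := by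
          simp [lastM, List.filter_append, hb]
        rw [if_neg h, hfil, ih d]

-- filtering at any lowercase class commutes with inserting an element of a DIFFERENT class
lemma filter_insertBy_ne (before : String → String → Bool) (k l : String) (acc : List String)
    (h : (PySem.Str.lower k == l) = false) :
    (PySem.List.insertBy before k acc).filter (fun y => PySem.Str.lower y == l)
      = acc.filter (fun y => PySem.Str.lower y == l) := by
  induction acc with
  | nil => simp [PySem.List.insertBy, h]
  | cons y ys ih =>
      simp only [PySem.List.insertBy]
      by_cases hb : before k y = true
      · simp [hb, h]
      · simp only [hb]
        by_cases hy : (PySem.Str.lower y == l) = true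
        · simp [hy, ih]
        · simp [hy, ih]

-- inserting `k` into a key-sorted list puts it AFTER all elements of its own lowercase class
lemma filter_insertBy_eq (k : String) (acc : List String)
    (hp : acc.Pairwise (fun a b => PySem.Str.lower a ≤ PySem.Str.lower b)) :
    (PySem.List.insertBy (fun a b => decide (PySem.Str.lower a < PySem.Str.lower b)) k acc).filter
        (fun y => PySem.Str.lower y == PySem.Str.lower k)
      = acc.filter (fun y => PySem.Str.lower y == PySem.Str.lower k) ++ [k] := by
  induction acc with
  | nil => simp [PySem.List.insertBy]
  | cons y ys ih =>
      simp only [PySem.List.insertBy]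
      by_cases hb : PySem.Str.lower k < PySem.Str.lower y
      · -- k is inserted in front; nothing later is in k's class
        have hnone : ∀ z ∈ y :: ys, (PySem.Str.lower z == PySem.Str.lower k) = false := by
          intro z hz
          rcases List.mem_cons.mp hz with rfl | hz'
          · exact beq_eq_false_iff_ne.mpr (fun hEq => absurd (hEq ▸ hb) (lt_irrefl _))
          · have hyz := (List.pairwise_cons.mp hp).1 z hz'
            exact beq_eq_false_iff_ne.mpr
              (fun hEq => absurd (lt_of_lt_of_le hb (hEq ▸ hyz)) (lt_irrefl _))
        have hfil : (y :: ys).filter (fun z => PySem.Str.lower z == PySem.Str.lower k) = [] :=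
          List.filter_eq_nil_iff.mpr (by intro z hz; simp [hnone z hz])
        simp [hb, hfil]
      · simp only [decide_eq_true_eq, hb, if_false]
        rw [List.filter_cons, List.filter_cons, ih (List.pairwise_cons.mp hp).2]
        by_cases hy : (PySem.Str.lower y == PySem.Str.lower k) = true
        · simp [hy]
        · simp [hy]

-- stability: the stable sort preserves, within each lowercase class, the original order —
-- so filtering at any class gives the same list before and after sorting
lemma filter_sorted (keys : List String) (l : String) :
    (PySem.List.sorted keys (fun k => PySem.Str.lower k) false).filter
        (fun y => PySem.Str.lower y == l)
      = keys.filter (fun y => PySem.Str.lower y == l) := by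
  induction keys using List.reverseRecOn with
  | nil => simp [PySem.List.sorted]
  | append_singleton ks k ih =>
      rw [PySem.List.sorted_eq_foldl_insertBy, List.foldl_append]
      simp only [List.foldl_cons, List.foldl_nil]
      rw [← PySem.List.sorted_eq_foldl_insertBy]
      cases hfk : (PySem.Str.lower k == l) with
      | true =>
        have hl : l = PySem.Str.lower k := (beq_iff_eq.mp hfk).symm
        subst hl
        rw [filter_insertBy_eq k _ (PySem.List.sorted_pairwise ks (fun k => PySem.Str.lower k)),
          ih, List.filter_append]
        have hone : [k].filter (fun y => PySem.Str.lower y == PySem.Str.lower k) = [k] := by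
          simp only [List.filter_cons, List.filter_nil, beq_self_eq_true, if_true]
        rw [hone]
      | false =>
        rw [filter_insertBy_ne _ _ _ _ hfk, ih, List.filter_append]
        have hzero : [k].filter (fun y => PySem.Str.lower y == l) = [] := by
          simp only [List.filter_cons, List.filter_nil, hfk, Bool.false_eq_true, if_false]
        rw [hzero, List.append_nil]

-- the distinct lowercase classes of a ≤-sorted list are strictly increasing
lemma ofList_pairwise_lt (xs : List String) (hp : xs.Pairwise (· ≤ ·)) :
    (PySem.Set.ofList xs).Pairwise (· < ·) := by
  induction xs using List.reverseRecOn with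
  | nil => simp
  | append_singleton ys a ih =>
      have hys : ys.Pairwise (· ≤ ·) := hp.sublist (List.sublist_append_left ys [a])
      have hle : ∀ y ∈ ys, y ≤ a := by
        have := List.pairwise_append.mp hp
        intro y hy; exact this.2.2 y hy a (by simp)
      rw [PySem.Set.ofList_eq_foldl, List.foldl_append]
      simp only [List.foldl_cons, List.foldl_nil]
      rw [← PySem.Set.ofList_eq_foldl]
      by_cases hmem : a ∈ PySem.Set.ofList ys
      · have hm : a ∈ ys := (PySem.Set.mem_ofList ys a).mp hmem
        simpa [PySem.Set.add, (PySem.Set.contains_iff _ _).mpr hmem, hm] using ih hys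
      · have hm : a ∉ ys := fun h => hmem ((PySem.Set.mem_ofList ys a).mpr h)
        have hadd : PySem.Set.add (PySem.Set.ofList ys) a = PySem.Set.ofList ys ++ [a] := by
          simp only [PySem.Set.add]
          rw [if_neg (by simpa using fun hc => hmem ((PySem.Set.contains_iff _ _).mp hc))]
        rw [hadd, List.pairwise_append]
        refine ⟨ih hys, by simp, ?_⟩
        intro y hy b hb
        rcases List.mem_singleton.mp hb with rfl
        have hy' : y ∈ ys := (PySem.Set.mem_ofList ys y).mp hy
        exact lt_of_le_of_ne (hle y hy') (by rintro rfl; exact hmem hy)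

-- lowercase of the representative stored for class `l` is `l` itself
lemma lc_lastM (s : List String) (l : String) (hl : l ∈ s.map PySem.Str.lower) :
    ∃ g, lastM s l = some g ∧ PySem.Str.lower g = l := by
  rcases List.mem_map.mp hl with ⟨x, hx, hlx⟩
  have hne : s.filter (fun k => PySem.Str.lower k == l) ≠ [] := by
    intro hnil
    have := List.filter_eq_nil_iff.mp hnil x hx
    simp [hlx] at this
  refine ⟨(s.filter (fun k => PySem.Str.lower k == l)).getLast hne,
    List.getLast?_eq_some_getLast hne, ?_⟩
  have hmem := List.getLast_mem hne
  have h2 := (List.mem_filter.mp hmem).2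
  simpa using h2

-- in a strictly increasing `init ++ [a]`, every element is ≤ a
lemma mem_concat_le (init : List String) (a x : String)
    (hp : (init ++ [a]).Pairwise (· < ·)) (hx : x ∈ init ++ [a]) : x ≤ a := by
  rcases List.mem_append.mp hx with h | h
  · exact le_of_lt ((List.pairwise_append.mp hp).2.2 x h a (by simp))
  · rcases List.mem_singleton.mp h with rfl; exact le_refl _

-- the dedup pass over a key-sorted list produces, per lowercase class in order,
-- the last element of that class
lemma dedup_eq (s : List String)
    (hp : (s.map PySem.Str.lower).Pairwise (· ≤ ·)) :
    s.foldl dedupStep []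
      = (PySem.Set.ofList (s.map PySem.Str.lower)).map (fun l => (lastM s l).getD "") := by
  induction s using List.reverseRecOn with
  | nil => simp
  | append_singleton t k ih =>
      have hmapapp : (t ++ [k]).map PySem.Str.lower
          = t.map PySem.Str.lower ++ [PySem.Str.lower k] := by simp
      rw [hmapapp] at hp
      have hpt : (t.map PySem.Str.lower).Pairwise (· ≤ ·) :=
        hp.sublist (List.sublist_append_left _ _)
      have hle : ∀ l ∈ t.map PySem.Str.lower, l ≤ PySem.Str.lower k := by
        intro l hl
        exact (List.pairwise_append.mp hp).2.2 l hl _ (by simp)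
      have hlast : ∀ l, lastM (t ++ [k]) l
          = if (PySem.Str.lower k == l) = true then some k else lastM t l := by
        intro l
        cases hc : (PySem.Str.lower k == l) with
        | true => simp [lastM, List.filter_append, hc]
        | false => simp [lastM, List.filter_append, hc]
      have hR' : PySem.Set.ofList ((t ++ [k]).map PySem.Str.lower)
          = PySem.Set.add (PySem.Set.ofList (t.map PySem.Str.lower)) (PySem.Str.lower k) := by
        rw [hmapapp, PySem.Set.ofList_eq_foldl, List.foldl_append, ← PySem.Set.ofList_eq_foldl]
        rfl
      rw [List.foldl_append, List.foldl_cons, List.foldl_nil, ih hpt, hR']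
      by_cases ht : t = []
      · subst ht
        simp [dedupStep, PySem.Set.add, PySem.Set.contains, lastM]
      · -- R := the distinct lowercase classes of t, nonempty; rl its greatest element
        set R := PySem.Set.ofList (t.map PySem.Str.lower) with hRdef
        have hRne : R ≠ [] := by
          cases t with
          | nil => exact absurd rfl ht
          | cons h t' =>
              have hm : PySem.Str.lower h ∈ R :=
                (PySem.Set.mem_ofList _ _).mpr (by simp)
              intro hnil; rw [hnil] at hm; simp at hm
        have hRlt : R.Pairwise (· < ·) := ofList_pairwise_lt _ hpt
        have hlcF : ∀ l ∈ R, PySem.Str.lower ((lastM t l).getD "") = l := by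
          intro l hl
          obtain ⟨g, hg, hlcg⟩ := lc_lastM t l ((PySem.Set.mem_ofList _ _).mp hl)
          rw [hg]; exact hlcg
        set rl := R.getLast hRne with hrl
        have hRdecomp : R.dropLast ++ [rl] = R := List.dropLast_append_getLast hRne
        have hrl_mem : rl ∈ R := List.getLast_mem hRne
        have hmapF : R.map (fun l => (lastM t l).getD "")
            = R.dropLast.map (fun l => (lastM t l).getD "") ++ [(lastM t rl).getD ""] := by
          conv_lhs => rw [← hRdecomp]
          rw [List.map_append]; rfl
        have hstep : dedupStep (R.map (fun l => (lastM t l).getD "")) k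
            = if PySem.Str.lower ((lastM t rl).getD "") = PySem.Str.lower k
              then R.dropLast.map (fun l => (lastM t l).getD "") ++ [k]
              else R.map (fun l => (lastM t l).getD "") ++ [k] := by
          rw [hmapF]
          simp only [dedupStep, List.getLast?_concat]
          by_cases hc : PySem.Str.lower ((lastM t rl).getD "") = PySem.Str.lower k
          · rw [if_pos hc, if_pos hc, List.dropLast_concat]
          · rw [if_neg hc, if_neg hc, ← hmapF]
        rw [hstep, hlcF rl hrl_mem]
        by_cases hcase : rl = PySem.Str.lower k
        · -- k's class is already the last class: overwrite its representative
          rw [if_pos hcase]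
          have hmem : PySem.Str.lower k ∈ R := hcase ▸ hrl_mem
          have hadd : PySem.Set.add R (PySem.Str.lower k) = R := by
            simp [PySem.Set.add, hmem]
          rw [hadd]
          conv_rhs => rw [← hRdecomp]
          rw [List.map_append]
          congr 1
          · apply List.map_congr_left
            intro l hl
            have hlt : l < rl := (List.pairwise_append.mp (hRdecomp ▸ hRlt)).2.2 l hl rl (by simp)
            have hne : (PySem.Str.lower k == l) = false := by
              rw [← hcase]; exact beq_eq_false_iff_ne.mpr (fun h => absurd (h ▸ hlt) (lt_irrefl _))
            rw [hlast l, hne]; simp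
          · rw [List.map_singleton, hlast rl, hcase, beq_self_eq_true]; simp
        · -- k opens a new class at the end
          rw [if_neg hcase]
          have hnotin : PySem.Str.lower k ∉ R := by
            intro hin
            have h1 : PySem.Str.lower k ≤ rl :=
              mem_concat_le R.dropLast rl _ (by rw [hRdecomp]; exact hRlt)
                (by rw [hRdecomp]; exact hin)
            have h2 : rl ≤ PySem.Str.lower k := hle rl ((PySem.Set.mem_ofList _ _).mp hrl_mem)
            exact hcase (le_antisymm h2 h1)
          have hadd : PySem.Set.add R (PySem.Str.lower k) = R ++ [PySem.Str.lower k] := by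
            simp only [PySem.Set.add]
            rw [if_neg (by simpa using fun hc => hnotin ((PySem.Set.contains_iff _ _).mp hc))]
          rw [hadd, List.map_append]
          congr 1
          · apply List.map_congr_left
            intro l hl
            have hne : (PySem.Str.lower k == l) = false :=
              beq_eq_false_iff_ne.mpr (fun h => hnotin (h ▸ hl))
            rw [hlast l, hne]; simp
          · rw [List.map_singleton, hlast, beq_self_eq_true]; simp

-- A, characterised: the sorted distinct classes, each mapped to its stored representative
lemma a_char (keys : List String) :
    sortedIgnoreCase_py keys
      = (PySem.List.sorted (PySem.Set.ofList (keys.map PySem.Str.lower)) (fun k => k) false).map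
          (fun l => (lastM keys l).getD "") := by
  show (PySem.List.sorted
      (keys.foldl (fun d key => d.insert (PySem.Str.lower key) key) PySem.Dict.empty).keys
      (fun k => k) false).foldl
      (fun result key => result ++
        [((keys.foldl (fun d key => d.insert (PySem.Str.lower key) key) PySem.Dict.empty).get? key).getD ""]) []
    = _
  rw [PySem.List.foldl_append_singleton_eq_map, List.nil_append]
  have hkeys : (keys.foldl (fun d key => d.insert (PySem.Str.lower key) key)
      (PySem.Dict.empty : PySem.Dict String String)).keys
      = PySem.Set.ofList (keys.map PySem.Str.lower) := by
    rw [PySem.Dict.keys_foldl_insert_key keys PySem.Str.lower (fun _ x => x) PySem.Dict.empty,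
      PySem.Dict.keys_empty, PySem.Set.ofList_eq_foldl]
    rfl
  rw [hkeys]
  apply List.map_congr_left
  intro l _
  rw [get?_dictFold keys PySem.Dict.empty l]
  cases lastM keys l with
  | none => simp [PySem.Dict.get?_empty]
  | some g => simp

-- ===== VERDICT (by name: the statement is the Claim_ definition above) =====
theorem sortedIgnoreCase_py_spec : Claim_equal_sortedIgnoreCase_py := by
  intro keys _
  show sortedIgnoreCase_py keys = sortedIgnoreCase_py_alt keys
  set s := PySem.List.sorted keys (fun k => PySem.Str.lower k) false with hs
  have hperm : (PySem.Set.ofList (s.map PySem.Str.lower)).Perm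
      (PySem.Set.ofList (keys.map PySem.Str.lower)) := by
    apply (List.perm_ext_iff_of_nodup (PySem.Set.nodup_ofList _) (PySem.Set.nodup_ofList _)).mpr
    intro x
    rw [PySem.Set.mem_ofList, PySem.Set.mem_ofList]
    constructor
    · intro hx
      rcases List.mem_map.mp hx with ⟨y, hy, rfl⟩
      exact List.mem_map_of_mem ((PySem.List.sorted_perm keys _ false).mem_iff.mp hy)
    · intro hx
      rcases List.mem_map.mp hx with ⟨y, hy, rfl⟩
      exact List.mem_map_of_mem ((PySem.List.sorted_perm keys _ false).mem_iff.mpr hy)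
  have hsorted : PySem.List.sorted (PySem.Set.ofList (keys.map PySem.Str.lower)) (fun k => k) false
      = PySem.Set.ofList (s.map PySem.Str.lower) :=
    PySem.List.sorted_eq_of_perm_of_pairwise_lt _ _ _ hperm
      (ofList_pairwise_lt _ (PySem.List.sorted_map_key_pairwise keys _))
  rw [a_char keys, hsorted]
  have halt : sortedIgnoreCase_py_alt keys = s.foldl dedupStep [] := rfl
  rw [halt, dedup_eq s (PySem.List.sorted_map_key_pairwise keys _)]
  apply List.map_congr_left
  intro l _
  unfold lastM
  rw [hs, filter_sorted keys l]
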